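-- pv_equiv track=rewrite | github.com/opengauss-mirror/examples | whyhow/src/whyhow_api/utilities/common.py | compress_triples
-- ===== SOURCE A (Python) =====
-- from collections import defaultdict
-- from typing import Any, DefaultDict, Dict, List, Mapping, Sequence, Set, Tuple
--
-- def compress_triples(triples: List[Tuple[str, str, str]]) -> str:
--     """Compress triples into compact lines."""
--     structured: DefaultDict[Any, DefaultDict[Any, Set[str]]] = defaultdict(lambda: defaultdict(set))
--     for head, relation, tail in triples:
--         relation = relation.replace("_", " ").lower()
--         structured[head][relation].add(tail)
--
--     out: list[str] = []
--     for head, relations in sorted(structured.items()):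
--         for rel, tails in sorted(relations.items()):
--             out.append(f"{head} {rel} {', '.join(sorted(tails))}")
--     return "\n".join(out)
-- ===== SOURCE B (Python) =====
-- def compress_triples(triples):
--     """Compress triples into compact lines."""
--     norm = [(h, r.replace("_", " ").lower(), t) for h, r, t in triples]
--     lines = []
--     for head in sorted({h for h, _, _ in norm}):
--         for rel in sorted({r for h2, r, _ in norm if h2 == head}):
--             tails = sorted({t for h2, r2, t in norm if h2 == head and r2 == rel})
--             lines.append(f"{head} {rel} {', '.join(tails)}")
--     return "\n".join(lines)
-- ===== Notes on version B (the rewrite author's own statement) =====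
-- stated objective: simpler
-- what changed: Replaces A's nested defaultdict-of-sets index built in one pass and then doubly sorted with a dict-free decomposition: normalize once, then iterate the sorted distinct heads and, per head, the sorted distinct relations, collecting each group's tails by filtering the flat normalized list.
import Mathlib
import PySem

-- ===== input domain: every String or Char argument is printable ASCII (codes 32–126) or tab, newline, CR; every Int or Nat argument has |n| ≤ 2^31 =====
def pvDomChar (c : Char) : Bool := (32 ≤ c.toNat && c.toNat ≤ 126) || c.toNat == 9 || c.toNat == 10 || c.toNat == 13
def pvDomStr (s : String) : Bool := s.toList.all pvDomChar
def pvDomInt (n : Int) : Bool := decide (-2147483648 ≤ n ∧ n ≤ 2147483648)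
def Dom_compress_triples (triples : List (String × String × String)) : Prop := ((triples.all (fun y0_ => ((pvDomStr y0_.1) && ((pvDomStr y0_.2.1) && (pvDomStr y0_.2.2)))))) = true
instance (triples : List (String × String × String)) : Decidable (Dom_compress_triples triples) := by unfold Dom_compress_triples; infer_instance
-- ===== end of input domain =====

-- B trades A's nested dict index for a dict-free sorted-distinct-keys + filter decomposition (same output).
-- ===== PORT A =====
def pvNorm (r : String) : String := PySem.Str.lower (PySem.Str.replace r "_" " ")

-- structured[head][relation].add(tail) on defaultdict(lambda: defaultdict(set))
def pvBuild (triples : List (String × String × String)) : PySem.Dict String (PySem.Dict String (PySem.Set String)) :=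
  triples.foldl (fun d x =>
    let rel := pvNorm x.2.1
    let inner := d.getD x.1 PySem.Dict.empty
    d.insert x.1 (inner.insert rel (PySem.Set.add (inner.getD rel PySem.Set.empty) x.2.2)))
    PySem.Dict.empty

-- sorted(structured.items()) / sorted(relations.items()): Python compares the (key, value) tuples,
-- but the keys of a dict are distinct, so the comparison never reaches the (unorderable) second
-- component; key = fst with the stable sort is exact here.
def compress_triples (triples : List (String × String × String)) : String :=
  let structured := pvBuild triples
  let out := (PySem.List.sorted structured.items (fun p => p.1) false).foldl (fun out p =>
    (PySem.List.sorted p.2.items (fun q => q.1) false).foldl (fun out q =>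
      out ++ [p.1 ++ " " ++ q.1 ++ " " ++
        PySem.Str.join ", " (PySem.List.sorted q.2 (fun t => t) false)]) out) []
  PySem.Str.join "\n" out

-- ===== PORT B =====
def compress_triples_alt (triples : List (String × String × String)) : String :=
  let ns := triples.map (fun x => (x.1, pvNorm x.2.1, x.2.2))
  let lines := (PySem.List.sorted (PySem.Set.ofList (ns.map (fun x => x.1))) (fun h => h) false).foldl
    (fun acc head =>
      (PySem.List.sorted (PySem.Set.ofList ((ns.filter (fun x => x.1 == head)).map (fun x => x.2.1))) (fun r => r) false).foldl
        (fun acc rel =>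
          let tails := PySem.List.sorted
            (PySem.Set.ofList ((ns.filter (fun x => x.1 == head && x.2.1 == rel)).map (fun x => x.2.2))) (fun t => t) false
          acc ++ [head ++ " " ++ rel ++ " " ++ PySem.Str.join ", " tails]) acc) []
  PySem.Str.join "\n" lines

-- ===== PRECONDITION & SPEC =====
def Spec_compress_triples (triples : List (String × String × String)) (out : String) : Prop := out = compress_triples_alt triples
instance (triples : List (String × String × String)) (out : String) : Decidable (Spec_compress_triples triples out) := by unfold Spec_compress_triples; infer_instance

-- ===== CLAIM (what is proved, stated in full; the proofs are below) =====
def Claim_equal_compress_triples : Prop := ∀ (triples : List (String × String × String)), Dom_compress_triples triples → Spec_compress_triples triples (compress_triples triples)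

-- ===== LEMMAS AND PROOFS =====

-- the inner-dict update A performs for one triple
def pvInnerStep (inn : PySem.Dict String (PySem.Set String)) (x : String × String × String) :
    PySem.Dict String (PySem.Set String) :=
  inn.insert (pvNorm x.2.1) (PySem.Set.add (inn.getD (pvNorm x.2.1) PySem.Set.empty) x.2.2)

-- common canonical form both ports are reduced to (B-shaped, over the raw triples)
def pvCanon (t : List (String × String × String)) : String :=
  PySem.Str.join "\n" ((PySem.List.sorted (PySem.Set.ofList (t.map (fun x => x.1))) (fun h => h) false).foldl
    (fun acc head =>
      (PySem.List.sorted (PySem.Set.ofList ((t.filter (fun x => x.1 == head)).map (fun x => pvNorm x.2.1))) (fun r => r) false).foldl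
        (fun acc rel =>
          acc ++ [head ++ " " ++ rel ++ " " ++ PySem.Str.join ", "
            (PySem.List.sorted (PySem.Set.ofList ((t.filter (fun x => x.1 == head && pvNorm x.2.1 == rel)).map (fun x => x.2.2))) (fun s => s) false)]) acc) [])

lemma pvBuild_eq (t : List (String × String × String)) :
    pvBuild t = t.foldl (fun d x => d.insert x.1 (pvInnerStep (d.getD x.1 PySem.Dict.empty) x)) PySem.Dict.empty := rfl

lemma pvBuild_getD (l : List (String × String × String))
    (d : PySem.Dict String (PySem.Dict String (PySem.Set String))) (h : String) :
    (l.foldl (fun d x => d.insert x.1 (pvInnerStep (d.getD x.1 PySem.Dict.empty) x)) d).getD h PySem.Dict.empty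
      = (l.filter (fun x => x.1 == h)).foldl pvInnerStep (d.getD h PySem.Dict.empty) := by
  induction l generalizing d with
  | nil => rfl
  | cons a l ih =>
    by_cases hah : a.1 = h
    · simp only [List.foldl_cons, List.filter_cons, hah, beq_self_eq_true, if_pos, ih,
        List.foldl_cons]
      rw [PySem.Dict.getD_insert_self]
    · simp only [List.foldl_cons, List.filter_cons, ih]
      rw [PySem.Dict.getD_insert_of_ne _ _ _ (Ne.symm hah)]
      simp [hah]

lemma pvInner_getD (l : List (String × String × String))
    (inn : PySem.Dict String (PySem.Set String)) (r : String) :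
    (l.foldl pvInnerStep inn).getD r PySem.Set.empty
      = (l.filter (fun x => pvNorm x.2.1 == r)).foldl (fun s x => PySem.Set.add s x.2.2)
          (inn.getD r PySem.Set.empty) := by
  induction l generalizing inn with
  | nil => rfl
  | cons a l ih =>
    by_cases har : pvNorm a.2.1 = r
    · simp only [List.foldl_cons, List.filter_cons, har, beq_self_eq_true, if_pos, ih,
        List.foldl_cons, pvInnerStep]
      rw [PySem.Dict.getD_insert_self]
    · simp only [List.foldl_cons, List.filter_cons, ih, pvInnerStep]
      rw [PySem.Dict.getD_insert_of_ne _ _ _ (Ne.symm har)]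
      simp [har]

lemma pvBuild_keys (t : List (String × String × String)) :
    (pvBuild t).keys = PySem.Set.ofList (t.map (fun x => x.1)) := by
  rw [pvBuild_eq]
  rw [PySem.Dict.keys_foldl_insert_key t (fun x => x.1)
    (fun d x => pvInnerStep (d.getD x.1 PySem.Dict.empty) x) PySem.Dict.empty]
  exact PySem.Set.update_nil_left _

lemma pvInner_keys (l : List (String × String × String)) :
    (l.foldl pvInnerStep PySem.Dict.empty).keys = PySem.Set.ofList (l.map (fun x => pvNorm x.2.1)) := by
  have h := PySem.Dict.keys_foldl_insert_key l (fun x => pvNorm x.2.1)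
    (fun inn x => PySem.Set.add (inn.getD (pvNorm x.2.1) PySem.Set.empty) x.2.2) PySem.Dict.empty
  simpa [pvInnerStep, PySem.Set.update_nil_left] using h

-- sorted(d.items()) as a map over the sorted keys, when the sorted keys are strictly increasing
lemma sorted_items_map {ν : Type} (d : PySem.Dict String ν) (dflt : ν)
    (hnd : d.keys.Nodup)
    (hlt : (PySem.List.sorted d.keys (fun k => k) false).Pairwise (· < ·)) :
    PySem.List.sorted d.items (fun p => p.1) false
      = (PySem.List.sorted d.keys (fun k => k) false).map (fun k => (k, d.getD k dflt)) := by
  apply PySem.List.sorted_eq_of_perm_of_pairwise_lt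
  · rw [PySem.Dict.items_eq_map_keys d hnd dflt]
    exact (PySem.List.sorted_perm d.keys (fun k => k) false).map _
  · simpa [List.pairwise_map] using hlt

lemma foldl_add_eq_ofList (l : List (String × String × String)) :
    l.foldl (fun s x => PySem.Set.add s x.2.2) PySem.Set.empty
      = PySem.Set.ofList (l.map (fun x => x.2.2)) := by
  rw [← PySem.Set.update_map_eq_foldl_add l (fun x => x.2.2) PySem.Set.empty]
  exact PySem.Set.update_nil_left _

lemma a_eq_canon (t : List (String × String × String)) : compress_triples t = pvCanon t := by
  show PySem.Str.join "\n"
      ((PySem.List.sorted (pvBuild t).items (fun p => p.1) false).foldl (fun out p =>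
        (PySem.List.sorted p.2.items (fun q => q.1) false).foldl (fun out q =>
          out ++ [p.1 ++ " " ++ q.1 ++ " " ++
            PySem.Str.join ", " (PySem.List.sorted q.2 (fun s => s) false)]) out) [])
    = pvCanon t
  rw [sorted_items_map (pvBuild t) PySem.Dict.empty
      (by rw [pvBuild_keys]; exact PySem.Set.nodup_ofList _)
      (by rw [pvBuild_keys]; exact PySem.List.sorted_ofList_pairwise_lt _),
    pvBuild_keys, List.foldl_map, pvCanon]
  congr 1
  apply PySem.List.foldl_congr_mem
  intro acc head _
  rw [pvBuild_eq, pvBuild_getD]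
  have hd0 : (PySem.Dict.empty : PySem.Dict String (PySem.Dict String (PySem.Set String))).getD head PySem.Dict.empty = PySem.Dict.empty := rfl
  rw [hd0]
  rw [sorted_items_map _ PySem.Set.empty
      (by rw [pvInner_keys]; exact PySem.Set.nodup_ofList _)
      (by rw [pvInner_keys]; exact PySem.List.sorted_ofList_pairwise_lt _),
    pvInner_keys, List.foldl_map]
  apply PySem.List.foldl_congr_mem
  intro acc2 rel _
  rw [pvInner_getD]
  have he0 : (PySem.Dict.empty : PySem.Dict String (PySem.Set String)).getD rel PySem.Set.empty = PySem.Set.empty := rfl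
  rw [he0, foldl_add_eq_ofList, List.filter_filter]
  have hpred : (fun x : String × String × String => (pvNorm x.2.1 == rel) && (x.1 == head))
      = (fun x => (x.1 == head) && (pvNorm x.2.1 == rel)) := by
    funext x; rw [Bool.and_comm]
  rw [hpred]

lemma b_eq_canon (t : List (String × String × String)) : compress_triples_alt t = pvCanon t := by
  show PySem.Str.join "\n"
      (((PySem.List.sorted (PySem.Set.ofList ((t.map (fun x => (x.1, pvNorm x.2.1, x.2.2))).map (fun x => x.1))) (fun h => h) false).foldl
        (fun acc head =>
          (PySem.List.sorted (PySem.Set.ofList (((t.map (fun x => (x.1, pvNorm x.2.1, x.2.2))).filter (fun x => x.1 == head)).map (fun x => x.2.1))) (fun r => r) false).foldl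
            (fun acc rel =>
              acc ++ [head ++ " " ++ rel ++ " " ++ PySem.Str.join ", "
                (PySem.List.sorted (PySem.Set.ofList (((t.map (fun x => (x.1, pvNorm x.2.1, x.2.2))).filter (fun x => x.1 == head && x.2.1 == rel)).map (fun x => x.2.2))) (fun s => s) false)]) acc) []))
    = pvCanon t
  rw [pvCanon]
  simp only [List.filter_map, List.map_map, Function.comp_def]

theorem pv_main (t : List (String × String × String)) : compress_triples t = compress_triples_alt t := by
  rw [a_eq_canon, b_eq_canon]


-- ===== VERDICT (by name: the statement is the Claim_ definition above) =====
theorem compress_triples_spec : Claim_equal_compress_triples := by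
  intro t _
  unfold Spec_compress_triples
  exact pv_main t
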